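-- pv_equiv track=rewrite | github.com/Gitrequest/FloatLicenseEvaluation | main.py | LoginsPerDay
-- ===== SOURCE A (Python) =====
-- def LoginsPerDay(dates):
--     counter2 = 0
--     dates_filtered = []
--     for line in dates:
--         dates_filtered.append(line[0:10])
--
--     for line in dates_filtered:
--         if line == "03.01.2021":
--             counter2 += 1
--
--     u_dates = set(dates_filtered)
--     u_dates = sorted(u_dates)
--     return u_dates
-- ===== SOURCE B (Python) =====
-- def LoginsPerDay(dates):
--     truncated = [line[:10] for line in dates]
--     truncated.sort()
--     result = []
--     for d in truncated:
--         if not result or result[-1] != d: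
--             result.append(d)
--     return result
-- ===== Notes on version B (the rewrite author's own statement) =====
-- stated objective: simpler
-- what changed: Replaces A's set-then-sort (plus a dead counter loop over '03.01.2021') by sort-then-dedup-adjacent: truncate to line[:10], sort the list in place, and one linear pass keeps each string only when it differs from the last kept one; no set is built.
import Mathlib
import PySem

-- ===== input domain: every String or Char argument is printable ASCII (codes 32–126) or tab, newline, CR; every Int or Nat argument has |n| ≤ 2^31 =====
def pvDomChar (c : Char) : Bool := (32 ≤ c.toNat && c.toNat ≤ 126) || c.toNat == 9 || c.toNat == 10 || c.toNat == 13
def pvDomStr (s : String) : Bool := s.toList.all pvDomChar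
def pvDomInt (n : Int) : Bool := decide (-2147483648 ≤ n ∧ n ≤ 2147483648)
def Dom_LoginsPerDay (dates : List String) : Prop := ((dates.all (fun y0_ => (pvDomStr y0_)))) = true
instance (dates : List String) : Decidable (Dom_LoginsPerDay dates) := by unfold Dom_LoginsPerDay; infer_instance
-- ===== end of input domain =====

-- B replaces A's set-then-sort (and dead counter loop) by sort-then-dedup-adjacent; objective: simpler.

-- ===== PORT A =====
def LoginsPerDay (dates : List String) : List String :=
  let counter2 : Int := 0
  let dates_filtered : List String :=
    dates.foldl (fun acc line => acc ++ [PySem.Str.slice line (some 0) (some 10)]) []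
  let _counter2 : Int :=
    dates_filtered.foldl (fun c line => if line = "03.01.2021" then c + 1 else c) counter2
  let u_dates : PySem.Set String := PySem.Set.ofList dates_filtered
  PySem.List.sorted u_dates (fun x => x) false

-- ===== PORT B =====
def LoginsPerDay_alt (dates : List String) : List String :=
  let truncated : List String := dates.map (fun line => PySem.Str.slice line none (some 10))
  let truncated : List String := PySem.List.sorted truncated (fun x => x) false
  truncated.foldl
    (fun result d => if result = [] ∨ result.getLast? ≠ some d then result ++ [d] else result) []

-- ===== PRECONDITION & SPEC =====
def Spec_LoginsPerDay (dates : List String) (out : List String) : Prop := out = LoginsPerDay_alt dates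
instance (dates : List String) (out : List String) : Decidable (Spec_LoginsPerDay dates out) := by unfold Spec_LoginsPerDay; infer_instance

-- ===== CLAIM (what is proved, stated in full; the proofs are below) =====
def Claim_equal_LoginsPerDay : Prop := ∀ (dates : List String), Dom_LoginsPerDay dates → Spec_LoginsPerDay dates (LoginsPerDay dates)

-- ===== LEMMAS AND PROOFS =====

-- the append-in-a-loop of A is map
theorem pvFoldlPushMap (f : String → String) (dates acc : List String) :
    dates.foldl (fun acc line => acc ++ [f line]) acc = acc ++ dates.map f := by
  induction dates generalizing acc with
  | nil => simp
  | cons d t ih => simp [List.foldl, ih]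

-- s[0:10] = s[:10]
theorem pvSliceZero (s : String) (b : Option Int) :
    PySem.Str.slice s (some 0) b = PySem.Str.slice s none b := by
  apply String.ext
  simp [PySem.Str.toList_slice]

-- last of a <-sorted list bounds every element
theorem pvLeGetLast {acc : List String} {y z : String}
    (h : acc.Pairwise (· < ·)) (hy : y ∈ acc) (hz : acc.getLast? = some z) : y ≤ z := by
  induction acc with
  | nil => cases hy
  | cons a t ih =>
    cases t with
    | nil =>
      simp at hy hz; simp [hy, hz]
    | cons b u =>
      simp only [List.getLast?_cons_cons] at hz
      rcases List.mem_cons.mp hy with rfl | hy'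
      · have hb : z ∈ b :: u := List.mem_of_getLast? hz
        exact le_of_lt ((List.pairwise_cons.mp h).1 z hb)
      · exact ih (List.pairwise_cons.mp h).2 hy' hz

-- invariant for B's dedup-adjacent loop
theorem pvDedupInv (l : List String) : ∀ (acc : List String),
    l.Pairwise (· ≤ ·) → acc.Pairwise (· < ·) →
    (∀ x ∈ l, ∀ y, acc.getLast? = some y → y ≤ x) →
    (l.foldl (fun result d => if result = [] ∨ result.getLast? ≠ some d then result ++ [d] else result) acc).Pairwise (· < ·) ∧
    (∀ x, x ∈ l.foldl (fun result d => if result = [] ∨ result.getLast? ≠ some d then result ++ [d] else result) acc ↔ x ∈ acc ∨ x ∈ l) := by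
  induction l with
  | nil => intro acc _ hacc _; simpa using hacc
  | cons d t ih =>
    intro acc hl hacc hconn
    have hdt : ∀ x ∈ t, d ≤ x := fun x hx => (List.pairwise_cons.mp hl).1 x hx
    have hlt : t.Pairwise (· ≤ ·) := (List.pairwise_cons.mp hl).2
    simp only [List.foldl]
    by_cases hc : acc = [] ∨ acc.getLast? ≠ some d
    · -- append d
      rw [if_pos hc]
      have hlast : (acc ++ [d]).getLast? = some d := by simp
      have hlt' : ∀ y ∈ acc, y < d := by
        intro y hy
        have hne : acc ≠ [] := List.ne_nil_of_mem hy
        obtain ⟨z, hz⟩ := Option.isSome_iff_exists.mp (List.getLast?_isSome.mpr hne)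
        have hyz : y ≤ z := pvLeGetLast hacc hy hz
        have hzd : z ≤ d := hconn d (by simp) z hz
        rcases hc with hnil | hne'
        · exact absurd (List.ne_nil_of_mem hy) (by simp [hnil])
        · rcases lt_or_eq_of_le hzd with h' | rfl
          · exact lt_of_le_of_lt hyz h'
          · exact absurd hz hne'
      have hacc' : (acc ++ [d]).Pairwise (· < ·) := by
        rw [List.pairwise_append]
        exact ⟨hacc, by simp, by intro a ha b hb; simp at hb; subst hb; exact hlt' a ha⟩
      have hconn' : ∀ x ∈ t, ∀ y, (acc ++ [d]).getLast? = some y → y ≤ x := by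
        intro x hx y hy; rw [hlast] at hy; cases hy; exact hdt x hx
      obtain ⟨h1, h2⟩ := ih (acc ++ [d]) hlt hacc' hconn'
      refine ⟨h1, fun x => ?_⟩
      rw [h2]; simp; tauto
    · -- skip d
      rw [if_neg hc]
      rw [not_or, not_ne_iff] at hc
      have hd : acc.getLast? = some d := hc.2
      have hdmem : d ∈ acc := List.mem_of_getLast? hd
      have hconn' : ∀ x ∈ t, ∀ y, acc.getLast? = some y → y ≤ x := by
        intro x hx y hy; rw [hd] at hy; cases hy; exact hdt x hx
      obtain ⟨h1, h2⟩ := ih acc hlt hacc hconn'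
      refine ⟨h1, fun x => ?_⟩
      rw [h2]
      constructor
      · tauto
      · rintro (h | h)
        · exact Or.inl h
        · rcases List.mem_cons.mp h with rfl | h'
          · exact Or.inl hdmem
          · exact Or.inr h'

-- sort-then-dedup-adjacent equals sorted(set(·))
theorem pvSortedSet (ys : List String) :
    PySem.List.sorted (PySem.Set.ofList ys) (fun x => x) false =
      (PySem.List.sorted ys (fun x => x) false).foldl
        (fun result d => if result = [] ∨ result.getLast? ≠ some d then result ++ [d] else result) [] := by
  set s := PySem.List.sorted ys (fun x => x) false with hs
  have hps : s.Pairwise (· ≤ ·) := by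
    simpa using PySem.List.sorted_pairwise (xs := ys) (key := fun x => x)
  obtain ⟨hlt, hmem⟩ := pvDedupInv s [] hps (by simp) (by simp)
  set r := s.foldl (fun result d => if result = [] ∨ result.getLast? ≠ some d then result ++ [d] else result) [] with hr
  have hnd : r.Nodup := hlt.imp ne_of_lt
  have hperm : r.Perm (PySem.Set.ofList ys) := by
    rw [List.perm_ext_iff_of_nodup hnd (PySem.Set.nodup_ofList ys)]
    intro x
    rw [hmem x, PySem.Set.mem_ofList]
    simp [hs, PySem.List.mem_sorted]
  exact (PySem.List.sorted_eq_of_perm_of_pairwise_lt (PySem.Set.ofList ys) r (fun x => x) hperm (by simpa using hlt)).symm ▸ rfl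

-- ===== VERDICT (by name: the statement is the Claim_ definition above) =====
theorem LoginsPerDay_spec : Claim_equal_LoginsPerDay := by
  intro dates _
  unfold Spec_LoginsPerDay LoginsPerDay LoginsPerDay_alt
  simp only [pvFoldlPushMap, List.nil_append, pvSliceZero]
  exact pvSortedSet _
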